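-- pv_equiv track=rewrite | github.com/hsecit/pyplay | solution.py | count_hashtag_occurrence
-- ===== SOURCE A (Python) =====
-- def filter_hashtags(_list):
--     hash_tags = []
--     for el in _list:
--         if el != '':
--             if str(el)[0] == '#':
--                 hash_tags.append(el)
--     return hash_tags
--
-- def count_hashtag_occurrence(_list):
--     _list = filter_hashtags(_list)
--     # store element that already counted
--     counted = []
--     # {element : number_occurrence}
--     tag_count = {}
--     for el in _list:
--         count = 0
--         if el not in counted :
--             for x in _list :
--                 if x == el :
--                     count+=1
--             counted.append(el)
--             tag_count[el] = count
--     return tag_count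
-- ===== SOURCE B (Python) =====
-- def count_hashtag_occurrence(_list):
--     # One pass: filter and count in the same loop with a running tally
--     # (dict preserves first-occurrence insertion order, like A's result).
--     tag_count = {}
--     for el in _list:
--         if el != '' and str(el)[0] == '#':
--             tag_count[el] = tag_count.get(el, 0) + 1
--     return tag_count
-- ===== Notes on version B (the rewrite author's own statement) =====
-- stated objective: simpler
-- what changed: Replaces A's separate filter pass, 'counted' list and per-distinct-tag full rescan of the filtered list with a single loop keeping a running dict tally.
import Mathlib
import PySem

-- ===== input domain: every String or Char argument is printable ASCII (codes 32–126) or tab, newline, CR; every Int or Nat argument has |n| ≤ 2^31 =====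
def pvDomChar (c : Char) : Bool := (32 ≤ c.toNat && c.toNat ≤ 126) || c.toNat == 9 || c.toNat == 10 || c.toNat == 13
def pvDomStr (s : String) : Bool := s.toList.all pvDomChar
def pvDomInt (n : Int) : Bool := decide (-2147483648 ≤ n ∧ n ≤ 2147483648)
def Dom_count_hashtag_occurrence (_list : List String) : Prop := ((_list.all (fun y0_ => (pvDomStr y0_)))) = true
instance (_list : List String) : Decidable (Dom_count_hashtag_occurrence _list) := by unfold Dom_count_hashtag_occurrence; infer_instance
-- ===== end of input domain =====

-- B replaces A's filter pass + per-distinct-tag rescan with one loop keeping a running dict tally (objective: simpler).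

-- ===== PORT A =====
def filter_hashtags (_list : List String) : List String :=
  _list.foldl (fun hash_tags el =>
    if el ≠ "" then
      if PySem.Str.pyGet? el 0 = some '#' then hash_tags ++ [el] else hash_tags
    else hash_tags) []

def count_hashtag_occurrence (_list : List String) : List (String × Int) :=
  let l := filter_hashtags _list
  let st := l.foldl (fun (st : List String × PySem.Dict String Int) el =>
    if el ∉ st.1 then
      let count := l.foldl (fun c x => if x = el then c + 1 else c) (0 : Int)
      (st.1 ++ [el], st.2.insert el count)
    else st) ([], PySem.Dict.empty)
  st.2.items

-- ===== PORT B =====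
def count_hashtag_occurrence_alt (_list : List String) : List (String × Int) :=
  (_list.foldl (fun tag_count el =>
    if el ≠ "" ∧ PySem.Str.pyGet? el 0 = some '#' then
      tag_count.insert el (tag_count.getD el 0 + 1)
    else tag_count) (PySem.Dict.empty : PySem.Dict String Int)).items

-- ===== PRECONDITION & SPEC =====
def Spec_count_hashtag_occurrence (_list : List String) (out : List (String × Int)) : Prop := out = count_hashtag_occurrence_alt _list
instance (_list : List String) (out : List (String × Int)) : Decidable (Spec_count_hashtag_occurrence _list out) := by unfold Spec_count_hashtag_occurrence; infer_instance

-- ===== CLAIM (what is proved, stated in full; the proofs are below) =====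
def Claim_equal_count_hashtag_occurrence : Prop := ∀ (_list : List String), Dom_count_hashtag_occurrence _list → Spec_count_hashtag_occurrence _list (count_hashtag_occurrence _list)

-- ===== LEMMAS AND PROOFS =====

-- the hashtag test, as one Bool predicate
def hashp (el : String) : Bool := el != "" && (PySem.Str.pyGet? el 0 == some '#')

lemma filter_hashtags_eq (_list : List String) :
    filter_hashtags _list = _list.filter hashp := by
  unfold filter_hashtags
  have hf : (fun (hash_tags : List String) el =>
      if el ≠ "" then
        if PySem.Str.pyGet? el 0 = some '#' then hash_tags ++ [el] else hash_tags
      else hash_tags)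
      = (fun acc x => if hashp x = true then acc ++ [x] else acc) := by
    funext acc x
    by_cases h1 : x = "" <;> by_cases h2 : PySem.Str.pyGet? x 0 = some '#' <;>
      simp [hashp, h1, h2]
  rw [hf, PySem.List.foldl_append_if hashp (fun x => x) _list []]
  simp

lemma alt_eq_counter (_list : List String) :
    count_hashtag_occurrence_alt _list
      = (PySem.Dict.counter (_list.filter hashp)).items := by
  unfold count_hashtag_occurrence_alt
  have hf : (fun (tag_count : PySem.Dict String Int) el =>
      if el ≠ "" ∧ PySem.Str.pyGet? el 0 = some '#' then
        tag_count.insert el (tag_count.getD el 0 + 1)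
      else tag_count)
      = (fun (d : PySem.Dict String Int) x =>
          if hashp x = true then d.insert x (d.getD x 0 + 1) else d) := by
    funext d x
    by_cases h1 : x = "" <;> by_cases h2 : PySem.Str.pyGet? x 0 = some '#' <;>
      simp [hashp, h1, h2]
  rw [hf, ← List.foldl_filter, PySem.Dict.foldl_insert_getD_add_one_eq_counter]

-- invariant of A's outer loop: the dict holds one (k, cnt k) pair per counted tag,
-- counted tags accumulate as the ordered set of processed elements
lemma loopA (cnt : String → Int) :
    ∀ (l c : List String) (d : PySem.Dict String Int),
      d.items = c.map (fun k => (k, cnt k)) →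
      ((l.foldl (fun st el =>
          if el ∉ st.1 then (st.1 ++ [el], st.2.insert el (cnt el)) else st)
        (c, d)).2).items
        = (PySem.Set.update c l).map (fun k => (k, cnt k)) := by
  intro l
  induction l with
  | nil => intro c d hd; simpa [PySem.Set.update] using hd
  | cons el l ih =>
    intro c d hd
    rw [PySem.Set.update_cons]
    by_cases h : el ∈ c
    · have hadd : PySem.Set.add c el = c := by
        simp [PySem.Set.add, PySem.Set.contains, h]
      simp only [List.foldl_cons, h, not_true_eq_false, if_false, hadd]
      exact ih c d hd
    · have hadd : PySem.Set.add c el = c ++ [el] := by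
        simp [PySem.Set.add, PySem.Set.contains, h]
      have hnc : d.contains el = false := by
        obtain ⟨items⟩ := d
        simp only at hd
        subst hd
        simp [PySem.Dict.contains_mk, List.any_map, Function.comp]
        intro x hx hxe
        exact h (hxe ▸ hx)
      have hins : (d.insert el (cnt el)).items = c.map (fun k => (k, cnt k)) ++ [(el, cnt el)] := by
        rw [PySem.Dict.items_insert_of_not_contains d (cnt el) hnc, hd]
      simp only [List.foldl_cons, h, not_false_eq_true, if_true, hadd]
      exact ih (c ++ [el]) _ (by simpa using hins)

lemma cnt_eq (hs : List String) (el : String) :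
    hs.foldl (fun c x => if x = el then c + 1 else c) (0 : Int) = (hs.count el : Int) := by
  have h := PySem.List.foldl_count_if (fun x => x == el) hs 0
  simp only [beq_iff_eq] at h
  rw [h]
  simp [List.count_eq_countP]

-- ===== VERDICT (by name: the statement is the Claim_ definition above) =====
theorem count_hashtag_occurrence_spec : Claim_equal_count_hashtag_occurrence := by
  intro _list _
  show count_hashtag_occurrence _list = count_hashtag_occurrence_alt _list
  rw [alt_eq_counter, PySem.Dict.items_counter]
  unfold count_hashtag_occurrence
  rw [filter_hashtags_eq]
  set hs := _list.filter hashp with hhs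
  have h := loopA (fun el => hs.foldl (fun c x => if x = el then c + 1 else c) (0 : Int))
      hs [] PySem.Dict.empty (by simp [PySem.Dict.empty])
  simp only at h
  rw [h, PySem.Set.update_nil_left]
  apply List.map_congr_left
  intro k _
  simp [cnt_eq]
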